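-- pv_equiv track=rewrite | github.com/ahritik/leetcode | ValidWordAbbreviation408.py | wordAbbreviation
-- ===== SOURCE A (Python) =====
-- def wordAbbreviation(word, abbr) -> bool:
--     wordLength, digit = 0, 0
--     for character in abbr:
--         if character.isdigit():
--             if digit == 0 and character == '0':
--                 return False
--             digit = digit*10 + int(character)
--         else:
--             if digit != 0:
--                 wordLength += digit
--                 digit = 0
--             if wordLength >= len(word) or word[wordLength] != character:
--                 return False
--             wordLength += 1
--     if digit != 0:
--         wordLength += digit
--
--     return wordLength == len(word)
-- ===== SOURCE B (Python) =====
-- def _tokens(abbr):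
--     """Stage 1: tokenize abbr into letter chars and int values; None on a leading-zero number."""
--     toks = []
--     j = 0
--     while j < len(abbr):
--         if abbr[j].isdigit():
--             if abbr[j] == '0':
--                 return None
--             k = j
--             while k < len(abbr) and abbr[k].isdigit():
--                 k += 1
--             toks.append(int(abbr[j:k]))
--             j = k
--         else:
--             toks.append(abbr[j])
--             j += 1
--     return toks
--
-- def wordAbbreviation(word, abbr) -> bool:
--     toks = _tokens(abbr)
--     if toks is None:
--         return False
--     # Stage 2: lay out tokens, collecting (position, letter) constraints.
--     pos, p = [], 0
--     for t in toks:
--         if isinstance(t, int):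
--             p += t
--         else:
--             pos.append((p, t))
--             p += 1
--     # Stage 3: length and constraint verification.
--     return p == len(word) and all(q < len(word) and word[q] == c for q, c in pos)
-- ===== Notes on version B (the rewrite author's own statement) =====
-- stated objective: alternative
-- what changed: B is a staged pipeline: it first tokenizes the abbreviation into a token list (letters / numbers, rejecting leading zeros), then lays the tokens out into (position, letter) constraints plus a total length, and finally verifies all constraints and the length with an all() check, instead of A's single interleaved scan over abbr with a carried digit accumulator and early returns against the word.
import Mathlib
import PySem

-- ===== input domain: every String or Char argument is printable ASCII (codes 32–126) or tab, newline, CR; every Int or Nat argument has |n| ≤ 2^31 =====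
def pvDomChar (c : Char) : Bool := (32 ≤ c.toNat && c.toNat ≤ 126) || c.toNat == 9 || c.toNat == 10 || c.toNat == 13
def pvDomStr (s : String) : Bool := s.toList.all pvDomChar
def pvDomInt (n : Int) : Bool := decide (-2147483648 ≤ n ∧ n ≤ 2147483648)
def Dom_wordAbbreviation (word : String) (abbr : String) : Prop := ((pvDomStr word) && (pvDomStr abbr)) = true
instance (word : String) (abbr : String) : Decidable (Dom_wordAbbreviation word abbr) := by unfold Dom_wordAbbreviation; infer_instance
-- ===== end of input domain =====

-- B replaces A's single interleaved scan (digit accumulator + early returns against the word)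
-- by a staged pipeline: tokenize abbr, lay tokens out into (position, letter) constraints and
-- a total length, then verify everything at the end; same cost, different structure.

-- ===== PORT A =====
-- A's for-loop over abbr with state (wordLength, digit); early `return False` = value false.
-- `int(character)` is ported as c.toNat - 48, exact because it is guarded by isdigit;
-- `word[wordLength]` is ported via getD, exact because it is guarded by wordLength < len(word).
def goA (w : List Char) : Nat → Nat → List Char → Bool
  | wl, d, [] => (if d ≠ 0 then wl + d else wl) == w.length
  | wl, d, c :: rest =>
    if PySem.Chars.isdigit c then
      if d == 0 && c == '0' then false
      else goA w wl (d * 10 + (c.toNat - 48)) rest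
    else
      let wl' := if d ≠ 0 then wl + d else wl
      if wl' ≥ w.length || !(w.getD wl' ' ' == c) then false
      else goA w (wl' + 1) 0 rest

def wordAbbreviation (word : String) (abbr : String) : Bool :=
  goA word.toList 0 0 abbr.toList

-- ===== PORT B =====
-- a token of stage 1: either a letter of abbr or a parsed number
inductive Tok where
  | num : Nat → Tok
  | ch : Char → Tok
deriving DecidableEq, Repr

-- inner digit-run loop of _tokens: accumulate the number, return it and the rest
def takeNum : Nat → List Char → Nat × List Char
  | n, [] => (n, [])
  | n, c :: rest =>
    if PySem.Chars.isdigit c then takeNum (n * 10 + (c.toNat - 48)) rest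
    else (n, c :: rest)

-- (used by toksB's termination proof)
lemma takeNum_len (n : Nat) (l : List Char) : (takeNum n l).2.length ≤ l.length := by
  induction l generalizing n with
  | nil => simp [takeNum]
  | cons c rest ih =>
    simp only [takeNum]
    split
    · exact le_trans (ih _) (Nat.le_succ _)
    · simp

-- stage 1 (_tokens of Source B): none = leading-zero number (Source B returns None)
def toksB : List Char → Option (List Tok)
  | [] => some []
  | c :: rest =>
    if PySem.Chars.isdigit c then
      if c == '0' then none
      else
        let p := takeNum (c.toNat - 48) rest
        (toksB p.2).map (Tok.num p.1 :: ·)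
    else (toksB rest).map (Tok.ch c :: ·)
  termination_by l => l.length
  decreasing_by
  · exact Nat.lt_succ_of_le (takeNum_len _ _)
  · simp

-- stage 2 (the `for t in toks` loop of Source B): final position and the (position, letter) list
def layoutB : Nat → List Tok → Nat × List (Nat × Char)
  | p, [] => (p, [])
  | p, Tok.num v :: ts => layoutB (p + v) ts
  | p, Tok.ch c :: ts =>
    let r := layoutB (p + 1) ts
    (r.1, (p, c) :: r.2)

-- stage 3: length check and `all(...)` over the constraints (generalized start position,
-- instantiated with 0 by wordAbbreviation_alt, as in Source B)
def evalB (w : List Char) (start : Nat) (l : List Char) : Bool :=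
  match toksB l with
  | none => false
  | some ts =>
    let r := layoutB start ts
    (r.1 == w.length) && r.2.all (fun qc => decide (qc.1 < w.length) && (w.getD qc.1 ' ' == qc.2))

def wordAbbreviation_alt (word : String) (abbr : String) : Bool :=
  evalB word.toList 0 abbr.toList

-- ===== PRECONDITION & SPEC =====
def Spec_wordAbbreviation (word : String) (abbr : String) (out : Bool) : Prop := out = wordAbbreviation_alt word abbr
instance (word : String) (abbr : String) (out : Bool) : Decidable (Spec_wordAbbreviation word abbr out) := by unfold Spec_wordAbbreviation; infer_instance

-- ===== CLAIM =====
def Claim_equal_wordAbbreviation : Prop := ∀ (word : String) (abbr : String), Dom_wordAbbreviation word abbr → Spec_wordAbbreviation word abbr (wordAbbreviation word abbr)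

-- ===== LEMMAS AND PROOFS =====
lemma isdigit_iff (c : Char) : PySem.Chars.isdigit c = true ↔ 48 ≤ c.toNat ∧ c.toNat ≤ 57 := by
  unfold PySem.Chars.isdigit
  rw [Bool.and_eq_true, decide_eq_true_iff, decide_eq_true_iff, Char.le_def, Char.le_def,
    UInt32.le_iff_toNat_le, UInt32.le_iff_toNat_le]
  exact Iff.rfl

-- A's carried digit accumulator d, related to B's staged evaluation: with pending number d,
-- A's remaining run equals B's evaluation after the digit run is consumed into d.
lemma goA_eq_evalB (w : List Char) (l : List Char) : ∀ (wl d : Nat),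
    goA w wl d l =
      if d = 0 then evalB w wl l
      else evalB w (wl + (takeNum d l).1) (takeNum d l).2 := by
  induction l with
  | nil =>
    intro wl d
    by_cases hd : d = 0 <;> simp [goA, evalB, toksB, layoutB, takeNum, hd]
  | cons c rest ih =>
    intro wl d
    by_cases hc : PySem.Chars.isdigit c
    · by_cases hd : d = 0
      · subst hd
        by_cases h0 : c = '0'
        · subst h0
          simp [goA, evalB, toksB, hc]
        · have h48 : c.toNat ≠ 48 := fun hn => h0 (by rw [← Char.ofNat_toNat c, hn])
          obtain ⟨hlo, hhi⟩ := (isdigit_iff c).mp hc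
          have hv : c.toNat - 48 ≠ 0 := by omega
          have hb0 : (c == '0') = false := by simp [h0]
          simp only [goA, hc, if_true, hb0, Bool.and_false, Bool.false_eq_true, if_false,
            Nat.zero_mul, Nat.zero_add, beq_self_eq_true]
          rw [ih wl (c.toNat - 48), if_neg hv]
          -- evalB w (wl + p.1) p.2 = evalB w wl (c :: rest) with p = takeNum v rest
          conv_rhs => simp only [evalB, toksB, hc, if_true, hb0, Bool.false_eq_true, if_false]
          cases h : toksB (takeNum (c.toNat - 48) rest).2 with
          | none => simp [h, evalB]
          | some ts => simp [h, evalB, layoutB]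
      · have hg : (d == 0 && c == '0') = false := by simp [hd]
        have hv : d * 10 + (c.toNat - 48) ≠ 0 := by omega
        rw [if_neg hd]
        have hT : takeNum d (c :: rest) = takeNum (d * 10 + (c.toNat - 48)) rest := by
          simp [takeNum, hc]
        rw [hT]
        simp only [goA, hc, if_true, hg, Bool.false_eq_true, if_false]
        rw [ih wl (d * 10 + (c.toNat - 48)), if_neg hv]
    · -- letter: unify both sides to start position wl' = wl + pending d
      have hT : takeNum d (c :: rest) = (d, c :: rest) := by simp [takeNum, hc]
      have hrhs : (if d = 0 then evalB w wl (c :: rest)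
          else evalB w (wl + (takeNum d (c :: rest)).1) (takeNum d (c :: rest)).2)
          = evalB w (if d ≠ 0 then wl + d else wl) (c :: rest) := by
        by_cases hd : d = 0 <;> simp [hd, hT]
      rw [hrhs]
      simp only [goA, hc, Bool.false_eq_true, if_false]
      generalize (if d ≠ 0 then wl + d else wl) = wl'
      have hIH := ih (wl' + 1) 0
      rw [if_pos rfl] at hIH
      simp only [evalB, toksB, hc, Bool.false_eq_true, if_false]
      cases h : toksB rest with
      | none =>
        simp only [Option.map_none]
        split
        · rfl
        · rw [hIH]; simp [evalB, h]
      | some ts =>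
        simp only [Option.map_some]
        by_cases hge : w.length ≤ wl'
        · have h1 : (decide (wl' ≥ w.length) || !(w.getD wl' ' ' == c)) = true := by
            simp [ge_iff_le, hge]
          have h2 : decide (wl' < w.length) = false := by simp [Nat.not_lt.mpr hge]
          simp only [h1, if_true, layoutB, List.all_cons, h2, Bool.false_and, Bool.and_false]
        · have hlt : wl' < w.length := Nat.lt_of_not_le hge
          have hopt : w[wl']? = some w[wl'] := List.getElem?_eq_getElem hlt
          have hsome : w.getD wl' ' ' = w[wl'] := by simp [List.getD, hopt]
          by_cases hm : w[wl'] = c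
          · have hguard : (decide (wl' ≥ w.length) || !(w.getD wl' ' ' == c)) = false := by
              simp [ge_iff_le, hge, List.getD, hopt, hm]
            rw [hguard, if_neg (by simp), hIH]
            simp [evalB, h, layoutB, hlt, List.getD, hm]
          · have hguard : (decide (wl' ≥ w.length) || !(w.getD wl' ' ' == c)) = true := by
              simp [List.getD, hopt, hm]
            simp [layoutB, hlt, List.getD, hm]

-- ===== VERDICT =====
theorem wordAbbreviation_spec : Claim_equal_wordAbbreviation := by
  intro word abbr _
  unfold Spec_wordAbbreviation wordAbbreviation wordAbbreviation_alt
  simpa using goA_eq_evalB word.toList abbr.toList 0 0
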